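-- pv_equiv track=rewrite | github.com/codercommand/WebScratchFilter | decripter.py | __decripter
-- ===== SOURCE A (Python) =====
-- def __decripter(HTML):
--     """
--     This function decriptes HTML to a Json object.
--     It decriptes into a TREE format. The result is
--     something like this:
--     [
--         ['h1', 'Hello, world', 1],
--         ['p style="..."', 'This product is...', 2]
--     ]
--     """
--     page = []
--
--     for x in range(len(HTML)):
--
--         #This is the gate. It makes sure we are seeing tags
--         if HTML[x:x+2] != '</':
--             if HTML[x] == '<':
--
--                 #grabs tag name
--                 temp = x
--                 while HTML[temp] != '>':
--                     temp += 1
--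
--                 #Grabs tags content. If it sees an ending nested
--                 #tag it will think its done even though it hasn't
--                 #got everything
--                 temp2 = temp
--                 while HTML[temp2:temp2+2] != '</':
--                     temp2 += 1
--
--                 #Appends content to page.
--                 page.append([HTML[x+1:temp], HTML[temp+1:temp2]])
--
--     #returns array of decripted HTML
--     return page
-- ===== SOURCE B (Python) =====
-- def __decripter(HTML):
--     # Single right-to-left pass carrying: g = index of first '>' at or after i,
--     # c = start of first '</' at or after i, cg = start of first '</' at or after g
--     # (sentinel n when absent). O(n) instead of A's rescans per tag.
--     n = len(HTML)
--     page = []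
--     g = c = cg = n
--     for i in range(n - 1, -1, -1):
--         ch = HTML[i]
--         if ch == '>':
--             g = i
--             cg = c
--         if ch == '<' and i + 1 < n and HTML[i + 1] == '/':
--             c = i
--         elif ch == '<':
--             page.append([HTML[i + 1:g], HTML[g + 1:cg]])
--     page.reverse()
--     return page
-- ===== Notes on version B (the rewrite author's own statement) =====
-- stated objective: faster
-- what changed: A rescans forward from every '<' for the next '>' and then for the next '</' (repeated rescans); B makes one right-to-left pass carrying the next-'>' position, the next-'</' position, and the next-'</' position after that '>' as O(1) state, emitting each tag's pair directly.
import Mathlib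
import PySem

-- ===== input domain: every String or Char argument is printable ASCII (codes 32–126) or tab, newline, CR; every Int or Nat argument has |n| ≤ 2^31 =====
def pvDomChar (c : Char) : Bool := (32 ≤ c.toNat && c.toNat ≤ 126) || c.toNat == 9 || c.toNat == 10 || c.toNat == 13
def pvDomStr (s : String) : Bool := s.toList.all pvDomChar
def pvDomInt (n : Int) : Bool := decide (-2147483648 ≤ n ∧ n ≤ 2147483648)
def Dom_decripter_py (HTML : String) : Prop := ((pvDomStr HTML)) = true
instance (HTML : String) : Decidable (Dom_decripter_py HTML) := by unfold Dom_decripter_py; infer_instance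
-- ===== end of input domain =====

-- B replaces A's forward rescans from every '<' by one right-to-left pass with O(1) carried
-- state (next '>' / next '</' positions); the return values agree on Pre_ (where A returns at all).

-- ===== PORT A =====
-- Python slice HTML[a:b] for nonnegative a, b = (s.drop a).take (b - a); exact here since every
-- slice bound in both programs is a nonnegative index (Nat subtraction gives '' when b ≤ a, as Python does).
def pvSliceStr (s : List Char) (a b : Nat) : String := String.ofList ((s.drop a).take (b - a))

-- `while HTML[temp] != '>': temp += 1` ; `none` exactly where Python raises IndexError (no '>' at index ≥ temp)
def pvScanGt (s : List Char) (temp : Nat) : Option Nat :=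
  if h : temp < s.length then
    if s[temp] = '>' then some temp else pvScanGt s (temp + 1)
  else none
termination_by s.length - temp

-- `while HTML[temp2:temp2+2] != '</': temp2 += 1` ; `none` exactly where Python loops forever (no '</' at index ≥ temp2)
def pvScanClose (s : List Char) (temp2 : Nat) : Option Nat :=
  if (s.drop temp2).take 2 = ['<', '/'] then some temp2
  else if h : temp2 + 1 < s.length then pvScanClose s (temp2 + 1)
  else none
termination_by s.length - temp2

-- the body of A's `for x` loop, for one index x (branches in A's order)
def pvEmit (s : List Char) (x : Nat) : List (List String) :=
  if (s.drop x).take 2 ≠ ['<', '/'] then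
    if s[x]? = some '<' then
      match pvScanGt s x with
      | some temp =>
        match pvScanClose s temp with
        | some temp2 => [[pvSliceStr s (x + 1) temp, pvSliceStr s (temp + 1) temp2]]
        | none => []   -- Python diverges on these inputs (excluded by Pre_)
      | none => []     -- Python raises IndexError on these inputs (excluded by Pre_)
    else []
  else []

def decripter_py (HTML : String) : List (List String) :=
  let s := HTML.toList
  (List.range s.length).foldl (fun page x => page ++ pvEmit s x) []

-- ===== PORT B =====
-- one pass i = n-1 … 0 carrying g = first '>' at ≥ i, c = first '</' at ≥ i, cg = first '</' at ≥ g
-- (sentinel n = length when absent); B appends and reverses at the end, as Source B does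
def pvAltGo (s : List Char) : Nat → Nat → Nat → Nat → List (List String) → List (List String)
  | 0, _, _, _, page => page
  | i + 1, g, c, cg, page =>
    let g' := if s[i]? = some '>' then i else g
    let cg' := if s[i]? = some '>' then c else cg
    let c' := if s[i]? = some '<' ∧ s[i+1]? = some '/' then i else c
    let page' :=
      if s[i]? = some '<' ∧ s[i+1]? = some '/' then page
      else if s[i]? = some '<' then
        page ++ [[pvSliceStr s (i + 1) g', pvSliceStr s (g' + 1) cg']]
      else page
    pvAltGo s i g' c' cg' page'

def decripter_py_alt (HTML : String) : List (List String) :=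
  let s := HTML.toList
  (pvAltGo s s.length s.length s.length s.length []).reverse

-- ===== PRECONDITION & SPEC =====
-- "after position x there is a '>' at j, and a '</' at some k ≥ j"
def pvHasPair (s : List Char) (x : Nat) : Bool :=
  (List.range s.length).any fun j =>
    x ≤ j && s[j]? == some '>' &&
      (List.range s.length).any fun k =>
        j ≤ k && s[k]? == some '<' && s[k+1]? == some '/'

-- Pre_ = exactly the inputs on which A returns: for every tag-opening '<' (one not starting '</')
-- there is a later '>' (else A raises IndexError) followed by a '</' (else A loops forever).
def Pre_decripter_py (HTML : String) : Prop :=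
  ∀ x, x < HTML.toList.length → HTML.toList[x]? = some '<' → HTML.toList[x+1]? ≠ some '/' →
    pvHasPair HTML.toList x = true
instance (HTML : String) : Decidable (Pre_decripter_py HTML) := by unfold Pre_decripter_py; infer_instance

def pvWitness_decripter_py : String := "<h1>Hello</h1><p>x</p>"

def Spec_decripter_py (HTML : String) (out : List (List String)) : Prop := out = decripter_py_alt HTML
instance (HTML : String) (out : List (List String)) : Decidable (Spec_decripter_py HTML out) := by unfold Spec_decripter_py; infer_instance

-- ===== CLAIM (what is proved, stated in full; the proofs are below) =====
def Claim_equal_decripter_py : Prop := ∀ (HTML : String), Dom_decripter_py HTML → Pre_decripter_py HTML → Spec_decripter_py HTML (decripter_py HTML)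

-- ===== LEMMAS AND PROOFS =====

-- sentinel view of an optional position
def pvSent (n : Nat) : Option Nat → Nat
  | none => n
  | some k => k

def pvG (s : List Char) (i : Nat) : Nat := pvSent s.length (pvScanGt s i)
def pvC (s : List Char) (i : Nat) : Nat := pvSent s.length (pvScanClose s i)
def pvCG (s : List Char) (i : Nat) : Nat := pvC s (pvG s i)

lemma pvHasPair_iff (s : List Char) (x : Nat) :
    pvHasPair s x = true ↔
      ∃ j, j < s.length ∧ x ≤ j ∧ s[j]? = some '>' ∧
        ∃ k, k < s.length ∧ j ≤ k ∧ s[k]? = some '<' ∧ s[k+1]? = some '/' := by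
  simp [pvHasPair, List.any_eq_true, and_assoc]

lemma pvTake2 (s : List Char) (i : Nat) :
    (s.drop i).take 2 = ['<', '/'] ↔ s[i]? = some '<' ∧ s[i+1]? = some '/' := by
  induction s generalizing i with
  | nil => simp
  | cons a t ih =>
    cases i with
    | zero =>
      cases t with
      | nil => simp
      | cons b u => simp [List.take]
    | succ n => simpa using ih n

lemma scanGt_of_ge (s : List Char) (i : Nat) (h : s.length ≤ i) : pvScanGt s i = none := by
  rw [pvScanGt]; simp [Nat.not_lt.mpr h]

lemma scanClose_of_ge (s : List Char) (i : Nat) (h : s.length ≤ i) : pvScanClose s i = none := by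
  rw [pvScanClose]
  simp [List.drop_eq_nil_of_le h]
  omega

lemma scanGt_hit (s : List Char) (i : Nat) (h : s[i]? = some '>') : pvScanGt s i = some i := by
  have hi : i < s.length := by
    by_contra hn
    simp [List.getElem?_eq_none (Nat.le_of_not_lt hn)] at h
  rw [pvScanGt]
  have : s[i] = '>' := by
    have := (List.getElem?_eq_some_iff.mp h).2; simpa using this
  simp [hi, this]

lemma scanGt_skip (s : List Char) (i : Nat) (h : s[i]? ≠ some '>') :
    pvScanGt s i = pvScanGt s (i + 1) := by
  by_cases hi : i < s.length
  · rw [pvScanGt]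
    have : s[i] ≠ '>' := by
      intro he; exact h (by simp [hi, he])
    simp [hi, this]
  · rw [scanGt_of_ge s i (Nat.le_of_not_lt hi),
        scanGt_of_ge s (i+1) (by omega)]

lemma scanClose_hit (s : List Char) (i : Nat)
    (h : s[i]? = some '<' ∧ s[i+1]? = some '/') : pvScanClose s i = some i := by
  rw [pvScanClose]; simp [(pvTake2 s i).mpr h]

lemma scanClose_skip (s : List Char) (i : Nat)
    (h : ¬(s[i]? = some '<' ∧ s[i+1]? = some '/')) :
    pvScanClose s i = pvScanClose s (i + 1) := by
  have hm : ¬((s.drop i).take 2 = ['<', '/']) := fun hc => h ((pvTake2 s i).mp hc)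
  by_cases hi : i + 1 < s.length
  · rw [pvScanClose]; simp [hm, hi]
  · have hm2 : ¬((s.drop (i+1)).take 2 = ['<', '/']) := by
      intro hc
      have h1 := ((pvTake2 s (i+1)).mp hc).1
      have : i + 1 < s.length := by
        by_contra hn
        simp [List.getElem?_eq_none (Nat.le_of_not_lt hn)] at h1
      omega
    rw [pvScanClose, pvScanClose]
    simp [hm, hm2, hi]
    omega

lemma scanGt_some (s : List Char) :
    ∀ d x j, j - x = d → x ≤ j → s[j]? = some '>' →
      ∃ g, pvScanGt s x = some g ∧ g ≤ j := by
  intro d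
  induction d with
  | zero =>
    intro x j hd hle hj
    have : x = j := by omega
    subst this
    exact ⟨x, scanGt_hit s x hj, le_refl x⟩
  | succ d ih =>
    intro x j hd hle hj
    by_cases hx : s[x]? = some '>'
    · exact ⟨x, scanGt_hit s x hx, hle⟩
    · have hlt : x < j := by
        rcases Nat.lt_or_ge x j with h | h
        · exact h
        · have : x = j := by omega
          subst this; exact absurd hj hx
      obtain ⟨g, hg, hgle⟩ := ih (x+1) j (by omega) (by omega) hj
      exact ⟨g, by rw [scanGt_skip s x hx]; exact hg, hgle⟩

lemma scanClose_some (s : List Char) :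
    ∀ d x k, k - x = d → x ≤ k → s[k]? = some '<' → s[k+1]? = some '/' →
      ∃ c, pvScanClose s x = some c := by
  intro d
  induction d with
  | zero =>
    intro x k hd hle hk hk1
    have : x = k := by omega
    subst this
    exact ⟨x, scanClose_hit s x ⟨hk, hk1⟩⟩
  | succ d ih =>
    intro x k hd hle hk hk1
    by_cases hx : s[x]? = some '<' ∧ s[x+1]? = some '/'
    · exact ⟨x, scanClose_hit s x hx⟩
    · have hlt : x < k := by
        rcases Nat.lt_or_ge x k with h | h
        · exact h
        · have : x = k := by omega
          subst this; exact absurd ⟨hk, hk1⟩ hx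
      obtain ⟨c, hc⟩ := ih (x+1) k (by omega) (by omega) hk hk1
      exact ⟨c, by rw [scanClose_skip s x hx]; exact hc⟩

-- the key invariant: B's pass with correct carried state reproduces A's emissions in reverse
lemma altGo_eq (s : List Char)
    (hpre : ∀ x, x < s.length → s[x]? = some '<' → s[x+1]? ≠ some '/' → pvHasPair s x = true) :
    ∀ i, i ≤ s.length → ∀ page,
      pvAltGo s i (pvG s i) (pvC s i) (pvCG s i) page
        = page ++ ((List.range i).flatMap (pvEmit s)).reverse := by
  intro i
  induction i with
  | zero => intro _ page; simp [pvAltGo]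
  | succ i ih =>
    intro hle page
    have hi : i < s.length := by omega
    rw [pvAltGo]
    have hrange : ((List.range (i+1)).flatMap (pvEmit s)).reverse
        = (pvEmit s i).reverse ++ ((List.range i).flatMap (pvEmit s)).reverse := by
      rw [List.range_succ, List.flatMap_append, List.reverse_append]
      simp
    by_cases h1 : s[i]? = some '>'
    · -- current char is '>': g resets to i, cg to c; nothing emitted
      have h2f : ¬(s[i]? = some '<' ∧ s[i+1]? = some '/') := by
        rintro ⟨hc, -⟩; rw [h1] at hc; simp at hc
      have h3f : ¬(s[i]? = some '<') := by rw [h1]; simp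
      have hG : pvG s i = i := by simp [pvG, scanGt_hit s i h1, pvSent]
      have hC : pvC s i = pvC s (i+1) := by simp [pvC, scanClose_skip s i h2f]
      have hCG : pvCG s i = pvC s (i+1) := by rw [pvCG, hG, hC]
      have hemit : pvEmit s i = [] := by
        unfold pvEmit
        simp [h3f, (pvTake2 s i).not.mpr h2f]
      rw [if_pos h1, if_pos h1, if_neg h2f, if_neg h2f, if_neg h3f]
      have hIH := ih (by omega) page
      rw [hG, hC, hCG] at hIH
      rw [hIH, hrange, hemit]
      simp
    · have hGs : pvG s i = pvG s (i+1) := by simp [pvG, scanGt_skip s i h1]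
      have hCGs : pvCG s i = pvCG s (i+1) := by rw [pvCG, pvCG, hGs]
      by_cases h2 : s[i]? = some '<' ∧ s[i+1]? = some '/'
      · -- '</': c resets to i; nothing emitted
        have hC : pvC s i = i := by simp [pvC, scanClose_hit s i h2, pvSent]
        have hemit : pvEmit s i = [] := by
          unfold pvEmit
          simp [(pvTake2 s i).mpr h2]
        rw [if_neg h1, if_neg h1, if_pos h2, if_pos h2]
        have hIH := ih (by omega) page
        rw [hGs, hC, hCGs] at hIH
        rw [hIH, hrange, hemit]
        simp
      · have hC : pvC s i = pvC s (i+1) := by simp [pvC, scanClose_skip s i h2]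
        by_cases h3 : s[i]? = some '<'
        · -- tag opening: emitted by both
          have hns : s[i+1]? ≠ some '/' := fun hc => h2 ⟨h3, hc⟩
          obtain ⟨j, hjn, hxj, hj, k, hkn, hjk, hk, hk1⟩ :=
            (pvHasPair_iff s i).mp (hpre i hi h3 hns)
          obtain ⟨g0, hg0, hg0j⟩ := scanGt_some s (j - i) i j rfl hxj hj
          obtain ⟨c0, hc0⟩ := scanClose_some s (k - g0) g0 k rfl (by omega) hk hk1
          have hGv : pvG s i = g0 := by simp [pvG, hg0, pvSent]
          have hCGv : pvCG s i = c0 := by simp [pvCG, hGv, pvC, hc0, pvSent]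
          have hemit : pvEmit s i
              = [[pvSliceStr s (i + 1) g0, pvSliceStr s (g0 + 1) c0]] := by
            unfold pvEmit
            simp [h3, (pvTake2 s i).not.mpr h2, hg0, hc0]
          rw [if_neg h1, if_neg h1, if_neg h2, if_neg h2, if_pos h3]
          have hIH := ih (by omega)
            (page ++ [[pvSliceStr s (i + 1) g0, pvSliceStr s (g0 + 1) c0]])
          rw [hGv, hCGv] at hIH
          have e1 : pvG s (i + 1) = g0 := hGs.symm.trans hGv
          have e2 : pvCG s (i + 1) = c0 := hCGs.symm.trans hCGv
          rw [e1, e2, ← hC, hIH, hrange, hemit]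
          simp
        · -- ordinary character: state and page unchanged
          have hemit : pvEmit s i = [] := by
            unfold pvEmit
            simp [h3, (pvTake2 s i).not.mpr h2]
          rw [if_neg h1, if_neg h1, if_neg h2, if_neg h2, if_neg h3]
          have hIH := ih (by omega) page
          rw [hGs, hC, hCGs] at hIH
          rw [hIH, hrange, hemit]
          simp

lemma main_list (s : List Char)
    (hpre : ∀ x, x < s.length → s[x]? = some '<' → s[x+1]? ≠ some '/' → pvHasPair s x = true) :
    (List.range s.length).foldl (fun page x => page ++ pvEmit s x) []
      = (pvAltGo s s.length s.length s.length s.length []).reverse := by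
  have hG : pvG s s.length = s.length := by
    simp [pvG, scanGt_of_ge s s.length le_rfl, pvSent]
  have hC : pvC s s.length = s.length := by
    simp [pvC, scanClose_of_ge s s.length le_rfl, pvSent]
  have hCG : pvCG s s.length = s.length := by rw [pvCG, hG, hC]
  have h0 := altGo_eq s hpre s.length le_rfl []
  rw [hG, hC, hCG] at h0
  rw [h0, PySem.List.foldl_append_eq_flatMap]
  simp

-- ===== VERDICT (by name: the statement is the Claim_ definition above) =====
theorem decripter_py_spec : Claim_equal_decripter_py := by
  intro HTML _hdom hpre
  exact main_list HTML.toList hpre
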